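-- pv_equiv track=rewrite | github.com/vikhyatksrivastava/CustomPythonUtilities | src/main/interview_problems.py | calculate_num_of_days
-- ===== SOURCE A (Python) =====
-- def calculate_num_of_days(num_of_houses, first_house_to_infect):
--     num_of_days = 1
--     left_house = first_house_to_infect - 1
--     right_house = first_house_to_infect + 1
--     for i in range(num_of_houses):
--         if left_house > 0 or right_house <= num_of_houses:
--             num_of_days += 1
--             left_house -= 1
--             right_house += 1
--
--     return num_of_days
-- ===== SOURCE B (Python) =====
-- def calculate_num_of_days(num_of_houses, first_house_to_infect):
--     # Closed form: the infection spreads one house to each side per day until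
--     # both ends are reached; the loop caps the spread at num_of_houses steps.
--     spread = max(first_house_to_infect - 1, num_of_houses - first_house_to_infect)
--     return 1 + max(0, min(num_of_houses, spread))
-- ===== Notes on version B (the rewrite author's own statement) =====
-- stated objective: faster
-- what changed: Replaced the O(n) day-counting loop by the closed form 1 + max(0, min(n, max(f-1, n-f))).
import Mathlib
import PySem

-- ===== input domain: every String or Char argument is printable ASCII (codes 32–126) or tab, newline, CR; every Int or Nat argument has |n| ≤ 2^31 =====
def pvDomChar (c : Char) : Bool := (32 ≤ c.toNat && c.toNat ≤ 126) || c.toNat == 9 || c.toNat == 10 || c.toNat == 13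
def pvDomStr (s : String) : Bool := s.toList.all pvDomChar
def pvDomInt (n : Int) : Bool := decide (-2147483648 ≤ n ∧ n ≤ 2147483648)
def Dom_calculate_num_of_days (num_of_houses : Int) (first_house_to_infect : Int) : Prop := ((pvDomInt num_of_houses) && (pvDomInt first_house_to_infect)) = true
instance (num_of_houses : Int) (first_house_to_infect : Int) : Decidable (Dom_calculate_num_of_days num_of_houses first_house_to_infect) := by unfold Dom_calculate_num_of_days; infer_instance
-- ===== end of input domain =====

-- B replaces A's O(n) day-counting loop by the closed form 1 + max(0, min(n, max(f-1, n-f))) (O(1)).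


-- ===== PORT A =====
-- loop body: state (num_of_days, left_house, right_house); the loop variable i is unused
def pvStepA (num_of_houses : Int) (s : Int × Int × Int) : Int × Int × Int :=
  if s.2.1 > 0 ∨ s.2.2 ≤ num_of_houses then (s.1 + 1, s.2.1 - 1, s.2.2 + 1) else s

def calculate_num_of_days (num_of_houses : Int) (first_house_to_infect : Int) : Int :=
  let s := (PySem.List.pyRange 0 num_of_houses 1).foldl
    (fun s _ => pvStepA num_of_houses s)
    (1, first_house_to_infect - 1, first_house_to_infect + 1)
  s.1

-- ===== PORT B =====
def calculate_num_of_days_alt (num_of_houses : Int) (first_house_to_infect : Int) : Int :=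
  let spread := max (first_house_to_infect - 1) (num_of_houses - first_house_to_infect)
  1 + max 0 (min num_of_houses spread)

-- ===== PRECONDITION & SPEC =====
def Spec_calculate_num_of_days (num_of_houses : Int) (first_house_to_infect : Int) (out : Int) : Prop := out = calculate_num_of_days_alt num_of_houses first_house_to_infect
instance (num_of_houses : Int) (first_house_to_infect : Int) (out : Int) : Decidable (Spec_calculate_num_of_days num_of_houses first_house_to_infect out) := by unfold Spec_calculate_num_of_days; infer_instance

-- ===== CLAIM (what is proved, stated in full; the proofs are below) =====
def Claim_equal_calculate_num_of_days : Prop := ∀ (num_of_houses : Int) (first_house_to_infect : Int), Dom_calculate_num_of_days num_of_houses first_house_to_infect → Spec_calculate_num_of_days num_of_houses first_house_to_infect (calculate_num_of_days num_of_houses first_house_to_infect)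

-- ===== LEMMAS AND PROOFS =====

-- Invariant: states reachable from (1, f-1, f+1) have the form (d, f-d, f+d); writing
-- c := max (f-1) (n-f), the step increments d exactly while d ≤ c.
theorem pv_foldl_inv (n f : Int) (l : List Int) :
    ∀ d : Int, 1 ≤ d →
      ((l.foldl (fun s _ => pvStepA n s) (d, f - d, f + d)).1
        = if d ≤ max (f - 1) (n - f) then min (d + l.length) (max (f - 1) (n - f) + 1) else d) := by
  induction l with
  | nil =>
    intro d hd
    simp only [List.foldl_nil, List.length_nil]
    split_ifs with h <;> omega
  | cons x xs ih =>
    intro d hd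
    simp only [List.foldl_cons, List.length_cons]
    by_cases h : d ≤ max (f - 1) (n - f)
    · have hc : f - d > 0 ∨ f + d ≤ n := by omega
      have hstep : pvStepA n (d, f - d, f + d) = (d + 1, f - (d + 1), f + (d + 1)) := by
        simp only [pvStepA, if_pos hc]
        refine Prod.ext rfl (Prod.ext ?_ ?_) <;> simp <;> ring
      rw [hstep, ih (d + 1) (by omega)]
      split_ifs with h2 <;> push_cast <;> omega
    · have hc : ¬ (f - d > 0 ∨ f + d ≤ n) := by omega
      have hstep : pvStepA n (d, f - d, f + d) = (d, f - d, f + d) := by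
        simp only [pvStepA, if_neg hc]
      rw [hstep, ih d hd, if_neg h, if_neg h]

-- ===== VERDICT (by name: the statement is the Claim_ definition above) =====
theorem calculate_num_of_days_spec : Claim_equal_calculate_num_of_days := by
  intro n f _
  unfold Spec_calculate_num_of_days calculate_num_of_days calculate_num_of_days_alt
  have h := pv_foldl_inv n f (PySem.List.pyRange 0 n 1) 1 le_rfl
  simp only [PySem.List.length_pyRange_one] at h
  simp only [h]
  have hn : ((n - 0).toNat : Int) = max n 0 := by omega
  rw [hn]
  split_ifs with hc <;> omega
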